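-- pv_equiv track=rewrite | github.com/JustAlternate/ASD | TP1/ex11.py | trouver_disposition
-- ===== SOURCE A (Python) =====
-- import math
--
-- def trouver_disposition(N):
--     j = 1
--     i = 1
--     disposition = []
--     for i in range(N):
--         for j in range(N):
--             if math.gcd(i, j) == 1 and i+j == N and i > 0 and j > 0:
--                 disposition.append((i, j))
--     return disposition
-- ===== SOURCE B (Python) =====
-- import math
--
-- def trouver_disposition(N):
--     return [(i, N - i) for i in range(1, N) if math.gcd(i, N - i) == 1]
-- ===== Notes on version B (the rewrite author's own statement) =====
-- stated objective: faster
-- what changed: Replaced the O(N^2) double scan over all (i,j) pairs by a single pass over i with j fixed to N-i, keeping only the gcd test.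
import Mathlib
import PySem

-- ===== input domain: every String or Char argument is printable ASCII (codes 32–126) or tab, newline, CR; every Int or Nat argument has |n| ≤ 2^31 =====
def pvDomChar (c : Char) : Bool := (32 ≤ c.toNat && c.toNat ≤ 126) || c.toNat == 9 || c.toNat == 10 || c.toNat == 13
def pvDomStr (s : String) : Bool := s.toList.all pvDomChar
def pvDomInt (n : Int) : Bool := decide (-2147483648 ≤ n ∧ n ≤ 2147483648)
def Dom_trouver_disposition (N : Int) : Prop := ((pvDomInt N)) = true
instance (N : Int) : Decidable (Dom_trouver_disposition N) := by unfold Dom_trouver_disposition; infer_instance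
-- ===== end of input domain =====

-- B replaces A's O(N^2) double scan over all (i, j) pairs with a single pass over i, taking j = N - i (objective: faster, asymptotic).

-- ===== PORT A =====
-- nested 'for i in range(N): for j in range(N): if gcd(i,j)==1 and i+j==N and i>0 and j>0: append'
def trouver_disposition (N : Int) : List (Int × Int) :=
  (PySem.List.pyRange 0 N 1).foldl (fun disposition i =>
    (PySem.List.pyRange 0 N 1).foldl (fun disposition j =>
      if Int.gcd i j = 1 ∧ i + j = N ∧ i > 0 ∧ j > 0 then disposition ++ [(i, j)]
      else disposition) disposition) []

-- ===== PORT B =====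
-- '[(i, N - i) for i in range(1, N) if math.gcd(i, N - i) == 1]'
def trouver_disposition_alt (N : Int) : List (Int × Int) :=
  ((PySem.List.pyRange 1 N 1).filter (fun i => Int.gcd i (N - i) == 1)).map
    (fun i => (i, N - i))

-- ===== PRECONDITION & SPEC =====
def Spec_trouver_disposition (N : Int) (out : List (Int × Int)) : Prop := out = trouver_disposition_alt N
instance (N : Int) (out : List (Int × Int)) : Decidable (Spec_trouver_disposition N out) := by unfold Spec_trouver_disposition; infer_instance

-- ===== CLAIM (what is proved, stated in full; the proofs are below) =====
def Claim_equal_trouver_disposition : Prop := ∀ (N : Int), Dom_trouver_disposition N → Spec_trouver_disposition N (trouver_disposition N)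

-- ===== LEMMAS AND PROOFS =====

lemma filter_unique (l : List Int) (a : Int) (p : Int → Bool) (hn : l.Nodup)
    (h : ∀ x, p x = true → x = a) :
    l.filter p = if a ∈ l ∧ p a then [a] else [] := by
  induction l with
  | nil => simp
  | cons x xs ih =>
    rcases List.nodup_cons.mp hn with ⟨hx, hxs⟩
    by_cases hp : p x = true
    · have hxa := h x hp
      subst hxa
      have : xs.filter p = [] := by
        apply List.filter_eq_nil_iff.mpr
        intro y hy hpy
        exact hx ((h y hpy) ▸ hy)
      simp [hp, this]
    · rw [List.filter_cons_of_neg (by simpa using hp), ih hxs]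
      by_cases hax : a = x
      · subst hax; simp [hp]
      · simp [List.mem_cons, hax]

-- the inner loop's test picks at most one j, namely N - i
lemma filter_range_pick (N i : Int) :
    ((PySem.List.pyRange 0 N 1).filter
      (fun j => decide (Int.gcd i j = 1 ∧ i + j = N ∧ i > 0 ∧ j > 0))) =
    if 1 ≤ i ∧ i < N ∧ Int.gcd i (N - i) = 1 then [N - i] else [] := by
  rw [filter_unique _ (N - i) _ (PySem.List.nodup_pyRange_one 0 N)
      (by intro x hx; simp only [decide_eq_true_eq] at hx; omega)]
  by_cases hc : 1 ≤ i ∧ i < N ∧ Int.gcd i (N - i) = 1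
  · rw [if_pos, if_pos hc]
    refine ⟨PySem.List.mem_pyRange_one.mpr (by omega), ?_⟩
    simp only [decide_eq_true_eq]
    exact ⟨hc.2.2, by omega, by omega, by omega⟩
  · rw [if_neg, if_neg hc]
    intro ⟨hm, hp⟩
    have := PySem.List.mem_pyRange_one.mp hm
    simp only [decide_eq_true_eq] at hp
    exact hc ⟨by omega, by omega, hp.1⟩

lemma trouver_eq_flatMap (N : Int) :
    trouver_disposition N =
      (PySem.List.pyRange 0 N 1).flatMap (fun i =>
        if 1 ≤ i ∧ i < N ∧ Int.gcd i (N - i) = 1 then [(i, N - i)] else []) := by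
  unfold trouver_disposition
  have hinner : ∀ (i : Int) (acc : List (Int × Int)),
      (PySem.List.pyRange 0 N 1).foldl (fun disposition j =>
        if Int.gcd i j = 1 ∧ i + j = N ∧ i > 0 ∧ j > 0 then disposition ++ [(i, j)]
        else disposition) acc =
      acc ++ (if 1 ≤ i ∧ i < N ∧ Int.gcd i (N - i) = 1 then [(i, N - i)] else []) := by
    intro i acc
    have h := PySem.List.foldl_append_if
      (l := PySem.List.pyRange 0 N 1)
      (p := fun j => decide (Int.gcd i j = 1 ∧ i + j = N ∧ i > 0 ∧ j > 0))
      (f := fun j => (i, j)) (acc := acc)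
    simp only [decide_eq_true_eq] at h
    rw [h, filter_range_pick]
    rw [apply_ite (List.map (fun j => (i, j)))]
    rfl
  calc (PySem.List.pyRange 0 N 1).foldl (fun disposition i =>
        (PySem.List.pyRange 0 N 1).foldl (fun disposition j =>
          if Int.gcd i j = 1 ∧ i + j = N ∧ i > 0 ∧ j > 0 then disposition ++ [(i, j)]
          else disposition) disposition) []
      = (PySem.List.pyRange 0 N 1).foldl (fun acc i =>
          acc ++ (if 1 ≤ i ∧ i < N ∧ Int.gcd i (N - i) = 1 then [(i, N - i)] else [])) [] := by
        apply PySem.List.foldl_congr_mem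
        intro acc i _
        exact hinner i acc
    _ = _ := by
        rw [PySem.List.foldl_append_eq_flatMap]
        simp only [List.nil_append]

lemma flatMap_eq_filter_map (N : Int) (l : List Int) (h : ∀ x ∈ l, 1 ≤ x ∧ x < N) :
    l.flatMap (fun i => if 1 ≤ i ∧ i < N ∧ Int.gcd i (N - i) = 1 then [(i, N - i)] else []) =
    (l.filter (fun i => Int.gcd i (N - i) == 1)).map (fun i => (i, N - i)) := by
  induction l with
  | nil => simp
  | cons x xs ih =>
    have hx := h x (List.mem_cons_self)
    have ihs := ih (fun y hy => h y (List.mem_cons_of_mem _ hy))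
    by_cases hg : Int.gcd x (N - x) = 1
    · rw [List.flatMap_cons, if_pos ⟨hx.1, hx.2, hg⟩,
        List.filter_cons_of_pos (by simpa using hg), List.map_cons, ihs,
        List.singleton_append]
    · rw [List.flatMap_cons, if_neg (fun hcon => hg hcon.2.2),
        List.filter_cons_of_neg (by simpa using hg), ihs, List.nil_append]

-- ===== VERDICT (by name: the statement is the Claim_ definition above) =====
theorem trouver_disposition_spec : Claim_equal_trouver_disposition := by
  intro N _
  show trouver_disposition N = trouver_disposition_alt N
  rw [trouver_eq_flatMap]
  unfold trouver_disposition_alt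
  by_cases hN : N ≤ 0
  · rw [PySem.List.pyRange_one_eq_nil (by omega : N ≤ (0:Int)),
        PySem.List.pyRange_one_eq_nil (by omega : N ≤ (1:Int))]
    simp
  · rw [PySem.List.pyRange_one_cons (by omega : (0:Int) < N), List.flatMap_cons,
      flatMap_eq_filter_map N _ (fun x hx => by
        have := PySem.List.mem_pyRange_one.mp hx; omega)]
    rw [if_neg (by omega), List.nil_append]
    norm_num
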